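-- pv_equiv track=rewrite | github.com/Ashiq-am/Path-of-Python | 3.Data Types/Arrays Set 1 and Set 2/Prefix Sum/Find the maximum number of indices having 0 as Prefix sum/Find the maximum number of indices having 0 as Prefix sum.py | findmax_zeroprefixes
-- ===== SOURCE A (Python) =====
-- def findmax_zeroprefixes(arr, n):
--     # Initialize the arrays say prefix_sum
--     # to store the prefix sum and the array
--     # end mark to the mark array to mark
--     # the end of subarray starting with 0.
--     prefix_sum = [0] * n
--
--     endmark = [True] * n
--
--     # Initialize the variables flag to
--     # check whether 0 as occured before
--     # and max_freq to store the maximum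
--     # frequency of prefix sums of each
--     # subarray and res to store max
--     # possible 0 prefix sums.
--     flag = 0
--     max_freq = 0
--     res = 0
--
--     if (arr[0] == 0):
--         flag = 1
--
--     # Traverse through the the array and mark
--     # the end of subarray staring with 0.
--     for i in range(n):
--         if (i + 1 < n):
--             if (arr[i + 1] == 0):
--                 endmark[i] = True
--             else:
--                 endmark[i] = False
--         else:
--             endmark[i] = True
--
--     # Build the prefix sum array
--     # of the array arr[]
--     prefix_sum[0] = arr[0];
--     for i in range(1, n):
--         prefix_sum[i] = prefix_sum[i - 1] + arr[i]
--
--     res = 0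
--
--     # Initialize a map to store
--     # the frequencies
--     freq = {}
--     max_freq = 0
--
--     # Iterate through the array and add
--     # the frequency of most frequent
--     # prefix sum of each subarray
--     # starting with 0 to the res.
--     for i in range(n):
--         # If endmark of that index is false
--         # keep the frequency of prefix sum
--         # at that index increasing
--         if (endmark[i] == False):
--             if (prefix_sum[i] in freq):
--                 freq[prefix_sum[i]] = freq[prefix_sum[i]] + 1
--             else:
--                 freq[prefix_sum[i]] = 1
--             max_freq = max(max_freq, freq[prefix_sum[i]])
--
--         # Else add the maximum frequent
--         # prefix sum to the res.
--         else:
--             if (prefix_sum[i] in freq):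
--                 freq[prefix_sum[i]] = freq[prefix_sum[i]] + 1
--             else:
--                 freq[prefix_sum[i]] = 1
--
--             max_freq = max(max_freq, freq[prefix_sum[i]])
--
--             # For the first subarray whose
--             # sum is 0
--             if (flag == 0):
--                 # Add the frequency of
--                 # zero prefixsums
--                 if (0 in freq):
--                     res = res + freq[0]
--                 max_freq = 0
--                 freq.clear()
--                 flag = 1
--             # For the remaining subarrays starting
--             # with 0's
--             else:
--                 # Add the max frequency
--                 res = res + max_freq
--                 freq.clear()
--                 max_freq = 0
--     # Return the res
--     return res
-- ===== SOURCE B (Python) =====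
-- def findmax_zeroprefixes(arr, n):
--     # Segment decomposition: a new segment starts at index 0 and at every
--     # index i > 0 with arr[i] == 0; per segment count local prefix sums.
--     a = arr[:n]
--     first = a[0]
--     segs = []
--     cur = [first]
--     for x in a[1:]:
--         if x == 0:
--             segs.append(cur)
--             cur = [x]
--         else:
--             cur.append(x)
--     segs.append(cur)
--     res = 0
--     for k, seg in enumerate(segs):
--         cnt = {}
--         s = 0
--         for x in seg:
--             s += x
--             cnt[s] = cnt.get(s, 0) + 1
--         if k == 0 and first != 0:
--             res += cnt.get(0, 0)
--         else:
--             res += max(cnt.values())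
--     return res
-- ===== Notes on version B (the rewrite author's own statement) =====
-- stated objective: simpler
-- what changed: B replaces A's global prefix-sum array, endmark array and flag-driven single pass by an explicit group-then-process decomposition: partition the list into segments starting at index 0 and before each zero, then count local cumulative sums per segment (zero-count for a first segment not starting with 0, max frequency otherwise); no auxiliary global arrays are built.
import Mathlib
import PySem

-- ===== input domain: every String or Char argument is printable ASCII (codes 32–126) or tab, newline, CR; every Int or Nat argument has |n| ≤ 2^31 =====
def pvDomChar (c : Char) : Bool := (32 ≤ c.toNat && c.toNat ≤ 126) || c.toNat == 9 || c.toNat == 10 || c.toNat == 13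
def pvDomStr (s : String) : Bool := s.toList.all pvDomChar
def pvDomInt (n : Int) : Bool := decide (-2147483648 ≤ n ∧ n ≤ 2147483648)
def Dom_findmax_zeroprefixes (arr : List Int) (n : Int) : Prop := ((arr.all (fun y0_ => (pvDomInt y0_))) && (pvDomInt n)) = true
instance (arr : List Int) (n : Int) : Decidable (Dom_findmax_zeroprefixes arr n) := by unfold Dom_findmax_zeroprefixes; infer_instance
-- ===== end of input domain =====

-- B replaces A's global prefix-sum array, endmark array and flag-driven single pass
-- by an explicit segment decomposition (split before each zero) with a per-segment
-- local counter: a simpler, self-contained group-then-process decomposition.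

-- ===== PORT A =====
def findmax_zeroprefixes (arr : List Int) (n : Int) : Int :=
  let prefix_sum0 : List Int := List.replicate n.toNat 0
  let endmark0 : List Bool := List.replicate n.toNat true
  let flag : Int := if PySem.List.pyGetD arr 0 0 = 0 then 1 else 0
  let endmark := (PySem.List.pyRange 0 n 1).foldl (fun em i =>
      if i + 1 < n then
        (if PySem.List.pyGetD arr (i + 1) 0 = 0 then PySem.List.pySetD em i true
         else PySem.List.pySetD em i false)
      else PySem.List.pySetD em i true) endmark0
  let prefix_sum1 := PySem.List.pySetD prefix_sum0 0 (PySem.List.pyGetD arr 0 0)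
  let prefix_sum := (PySem.List.pyRange 1 n 1).foldl (fun ps i =>
      PySem.List.pySetD ps i (PySem.List.pyGetD ps (i - 1) 0 + PySem.List.pyGetD arr i 0)) prefix_sum1
  let st := (PySem.List.pyRange 0 n 1).foldl
    (fun (st : PySem.Dict Int Int × Int × Int × Int) i =>
      let p := PySem.List.pyGetD prefix_sum i 0
      if PySem.List.pyGetD endmark i true = false then
        let freq := st.1.modify p 0 (· + 1)
        (freq, max st.2.1 (freq.getD p 0), st.2.2.1, st.2.2.2)
      else
        let freq := st.1.modify p 0 (· + 1)
        let max_freq := max st.2.1 (freq.getD p 0)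
        if st.2.2.2 = 0 then
          (PySem.Dict.empty, 0,
            st.2.2.1 + (if freq.contains 0 then freq.getD 0 0 else 0), 1)
        else
          (PySem.Dict.empty, 0, st.2.2.1 + max_freq, st.2.2.2))
    (PySem.Dict.empty, 0, 0, flag)
  st.2.2.1

-- ===== PORT B =====
def findmax_zeroprefixes_alt (arr : List Int) (n : Int) : Int :=
  let a := PySem.List.slice arr none (some n)
  let first := PySem.List.pyGetD a 0 0
  let sc := (PySem.List.slice a (some 1) none).foldl
      (fun (sc : List (List Int) × List Int) x =>
        if x = 0 then (sc.1 ++ [sc.2], [x]) else (sc.1, sc.2 ++ [x]))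
      ([], [first])
  let segs := sc.1 ++ [sc.2]
  (PySem.List.enumerate segs 0).foldl (fun res ks =>
      let cs := ks.2.foldl (fun (cs : PySem.Dict Int Int × Int) x =>
          (cs.1.modify (cs.2 + x) 0 (· + 1), cs.2 + x)) (PySem.Dict.empty, 0)
      if ks.1 = 0 ∧ first ≠ 0 then res + cs.1.getD 0 0
      else res + (PySem.List.max? cs.1.values (fun v => v)).getD 0) 0

-- ===== PRECONDITION & SPEC =====
-- Pre_: exactly the inputs where Python A returns (otherwise arr[0] or the
-- assignment prefix_sum[0] / a read arr[i] raises IndexError): 1 ≤ n ≤ len(arr).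
def Pre_findmax_zeroprefixes (arr : List Int) (n : Int) : Prop :=
  1 ≤ n ∧ n ≤ (arr.length : Int)
instance (arr : List Int) (n : Int) : Decidable (Pre_findmax_zeroprefixes arr n) := by
  unfold Pre_findmax_zeroprefixes; infer_instance
def pvWitness_findmax_zeroprefixes : List Int × Int := ([2, -2, 0, 3, -3], 5)
def Spec_findmax_zeroprefixes (arr : List Int) (n : Int) (out : Int) : Prop := out = findmax_zeroprefixes_alt arr n
instance (arr : List Int) (n : Int) (out : Int) : Decidable (Spec_findmax_zeroprefixes arr n out) := by unfold Spec_findmax_zeroprefixes; infer_instance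

-- ===== CLAIM (what is proved, stated in full; the proofs are below) =====
def Claim_equal_findmax_zeroprefixes : Prop := ∀ (arr : List Int) (n : Int), Dom_findmax_zeroprefixes arr n → Pre_findmax_zeroprefixes arr n → Spec_findmax_zeroprefixes arr n (findmax_zeroprefixes arr n)

-- ===== LEMMAS AND PROOFS =====

-- Local running prefix sums of a list, starting from offset c.
def psums (c : Int) : List Int → List Int
  | [] => []
  | x :: t => (c + x) :: psums (c + x) t

theorem le_foldl_gmax {α : Type} (t : List α) (g : α → Int) (i : Int) :
    i ≤ t.foldl (fun m v => max m (g v)) i ∧ ∀ v ∈ t, g v ≤ t.foldl (fun m v => max m (g v)) i := by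
  induction t generalizing i with
  | nil => simp
  | cons x t ih =>
    refine ⟨le_trans (le_max_left _ _) (ih (max i (g x))).1, ?_⟩
    intro v hv
    rcases List.mem_cons.mp hv with rfl | hv
    · exact le_trans (le_max_right _ _) (ih (max i (g v))).1
    · exact (ih (max i (g x))).2 v hv

theorem foldl_gmax_le {α : Type} (t : List α) (g : α → Int) (i b : Int)
    (hi : i ≤ b) (h : ∀ v ∈ t, g v ≤ b) :
    t.foldl (fun m v => max m (g v)) i ≤ b := by
  induction t generalizing i with
  | nil => simpa
  | cons x t ih =>
    exact ih (max i (g x)) (max_le hi (h x (by simp))) (fun v hv => h v (by simp [hv]))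

theorem foldl_gmax_init {α : Type} (t : List α) (g : α → Int) (i c : Int) :
    t.foldl (fun m v => max m (g v)) (max i c) = max (t.foldl (fun m v => max m (g v)) i) c := by
  induction t generalizing i with
  | nil => simp
  | cons x t ih =>
    simp only [List.foldl_cons]
    rw [max_right_comm i c (g x), ih]

def cstep (dm : PySem.Dict Int Int × Int) (v : Int) : PySem.Dict Int Int × Int :=
  ((dm.1.modify v 0 (· + 1)), max dm.2 ((dm.1.modify v 0 (· + 1)).getD v 0))

theorem cstep_fst (L : List Int) (d : PySem.Dict Int Int) (m : Int) :
    (L.foldl cstep (d, m)).1 = L.foldl (fun d x => d.modify x 0 (· + 1)) d := by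
  induction L generalizing d m with
  | nil => rfl
  | cons x t ih => simpa [cstep] using ih (d.modify x 0 (· + 1)) _

theorem cstep_snd (L : List Int) (d : PySem.Dict Int Int) (m : Int) :
    (L.foldl cstep (d, m)).2
      = L.foldl (fun mm v => max mm (d.getD v 0 + (L.count v : Int))) m := by
  induction L generalizing d m with
  | nil => rfl
  | cons x t ih =>
    simp only [List.foldl_cons]
    have hstep : cstep (d, m) x = (d.modify x 0 (· + 1), max m (d.getD x 0 + 1)) := by
      simp [cstep, PySem.Dict.getD_modify_self]
    rw [hstep, ih]
    have hcongr : t.foldl (fun mm v => max mm ((d.modify x 0 (· + 1)).getD v 0 + (t.count v : Int)))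
        (max m (d.getD x 0 + 1))
        = t.foldl (fun mm v => max mm (d.getD v 0 + ((x :: t).count v : Int)))
        (max m (d.getD x 0 + 1)) := by
      apply PySem.List.foldl_congr_mem
      intro acc v hv
      rw [PySem.Dict.getD_modify]
      by_cases hvx : v = x
      · subst hvx
        rw [if_pos rfl, List.count_cons_self]
        push_cast; ring_nf
      · rw [if_neg hvx]
        have hxv : ¬ x = v := fun h => hvx h.symm
        have : List.count v (x :: t) = List.count v t := by
          simp [hxv]
        rw [this]
    rw [hcongr]
    by_cases hxt : x ∈ t
    · have h1 : (x :: t).count x = t.count x + 1 := by simp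
      have hc1 : d.getD x 0 + 1 ≤ d.getD x 0 + ((x :: t).count x : Int) := by
        rw [h1]; push_cast
        have := List.count_pos_iff.mpr hxt
        omega
      have hle := (le_foldl_gmax t (fun v => d.getD v 0 + ((x :: t).count v : Int)) m).2 x hxt
      have e1 := foldl_gmax_init t (fun v => d.getD v 0 + ((x :: t).count v : Int)) m (d.getD x 0 + 1)
      have e2 := foldl_gmax_init t (fun v => d.getD v 0 + ((x :: t).count v : Int)) m (d.getD x 0 + ((x :: t).count x : Int))
      rw [e1, e2, max_eq_left (le_trans hc1 hle), max_eq_left hle]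
    · have h0 : t.count x = 0 := List.count_eq_zero.mpr hxt
      have h1 : ((x :: t).count x : Int) = 1 := by simp [h0]
      rw [h1]

def maxcnt (L : List Int) : Int := L.foldl (fun m v => max m ((L.count v : Int))) 0

theorem cstep_snd_maxcnt (L : List Int) :
    (L.foldl cstep (PySem.Dict.empty, 0)).2 = maxcnt L := by
  rw [cstep_snd, maxcnt]
  apply PySem.List.foldl_congr_mem
  intro acc v hv
  have : (PySem.Dict.empty : PySem.Dict Int Int).getD v 0 = 0 := rfl
  rw [this, zero_add]

theorem max_values_counter (L : List Int) (hL : L ≠ []) :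
    (PySem.List.max? (PySem.Dict.counter L).values (fun v => v)).getD 0 = maxcnt L := by
  have hv : (PySem.Dict.counter L).values
      = (PySem.Set.ofList L).map (fun k => ((L.count k : Int))) := by
    rw [PySem.Dict.values_eq_map_keys _ (PySem.Dict.nodup_keys_counter L) 0,
      PySem.Dict.keys_counter]
    exact List.map_congr_left (fun k _ => PySem.Dict.getD_counter L k)
  rw [hv]
  obtain ⟨k0, ks, hk⟩ := List.exists_cons_of_ne_nil (l := PySem.Set.ofList L) (by
    intro h0
    have hm := (PySem.Set.mem_ofList L (L.head hL)).mpr (List.head_mem hL)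
    rw [h0] at hm
    simp at hm)
  rw [hk, List.map_cons, PySem.List.max?_id_cons]
  simp only [Option.getD_some]
  rw [List.foldl_map]
  have hle : ∀ v ∈ L, (L.count v : Int) ≤ ks.foldl (fun m k => max m ((L.count k : Int))) ((L.count k0 : Int)) := by
    intro v hv'
    have : v ∈ PySem.Set.ofList L := (PySem.Set.mem_ofList L v).mpr hv'
    rw [hk] at this
    rcases List.mem_cons.mp this with rfl | h
    · exact (le_foldl_gmax ks (fun k => (L.count k : Int)) ((L.count v : Int))).1
    · exact (le_foldl_gmax ks (fun k => (L.count k : Int)) ((L.count k0 : Int))).2 v h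
  apply le_antisymm
  · apply foldl_gmax_le
    · have : k0 ∈ L := by
        have : k0 ∈ PySem.Set.ofList L := by rw [hk]; simp
        exact (PySem.Set.mem_ofList L k0).mp this
      exact (le_foldl_gmax L (fun v => (L.count v : Int)) 0).2 k0 this
    · intro k hks
      have : k ∈ L := (PySem.Set.mem_ofList L k).mp (by rw [hk]; simp [hks])
      exact (le_foldl_gmax L (fun v => (L.count v : Int)) 0).2 k this
  · apply foldl_gmax_le
    · have hk0 : k0 ∈ L := (PySem.Set.mem_ofList L k0).mp (by rw [hk]; simp)
      have : 0 < L.count k0 := List.count_pos_iff.mpr hk0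
      calc (0 : Int) ≤ (L.count k0 : Int) := by positivity
        _ ≤ _ := hle k0 hk0
    · exact hle


theorem psums_len (c : Int) (l : List Int) : (psums c l).length = l.length := by
  induction l generalizing c with
  | nil => rfl
  | cons x t ih => simp [psums, ih]

theorem psums_append (c : Int) (u v : List Int) :
    psums c (u ++ v) = psums c u ++ psums (c + u.sum) v := by
  induction u generalizing c with
  | nil => simp [psums]
  | cons x t ih => simp [psums, ih, add_assoc]

theorem psums_add (c d : Int) (l : List Int) :
    psums (c + d) l = (psums d l).map (fun v => c + v) := by
  induction l generalizing d with
  | nil => rfl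
  | cons x t ih =>
    simp only [psums, List.map_cons, add_assoc, ih (d + x)]

theorem maxcnt_map_add (c : Int) (l : List Int) :
    maxcnt (l.map (fun v => c + v)) = maxcnt l := by
  unfold maxcnt
  rw [List.foldl_map]
  apply PySem.List.foldl_congr_mem
  intro acc v hv
  have : (l.map (fun v => c + v)).count (c + v) = l.count v :=
    List.count_map_of_injective l (fun v => c + v) (fun a b h => by dsimp at h; omega) v
  rw [this]

theorem maxcnt_psums_shift (c : Int) (l : List Int) :
    maxcnt (psums c l) = maxcnt (psums 0 l) := by
  have : psums c l = (psums 0 l).map (fun v => c + v) := by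
    have := psums_add c 0 l; simpa using this
  rw [this, maxcnt_map_add]

theorem psums_getElem (c : Int) (l : List Int) (i : Nat) (h : i < l.length) :
    (psums c l)[i]'(by rw [psums_len]; exact h) = c + (l.take (i + 1)).sum := by
  induction l generalizing c i with
  | nil => simp at h
  | cons x t ih =>
    cases i with
    | zero => simp [psums]
    | succ j =>
      simp only [psums, List.getElem_cons_succ, List.take_succ_cons, List.sum_cons]
      rw [ih (c + x) j (by simpa using h)]
      ring

-- the marker list: True exactly before a following zero
def bm (t : List Int) : List Bool := t.map (fun z => decide (z = 0))

-- spec value of the remaining segments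
mutual
def segSpec (y : Int) (r : List Int) : Int :=
  maxcnt (psums 0 (y :: r.takeWhile (fun z => z != 0))) +
    segRest (r.dropWhile (fun z => z != 0))
termination_by (r.length, 1)
decreasing_by
  have := List.length_dropWhile_le (fun z => z != 0) r
  simp only [Prod.lex_def]; omega
def segRest : List Int → Int
  | [] => 0
  | w :: r' => segSpec w r'
termination_by v => (v.length, 0)
decreasing_by simp only [Prod.lex_def, List.length_cons]; omega
end

-- the segments of cur ++ t, splitting before each zero of t
mutual
def segsOf (cur : List Int) (t : List Int) : List (List Int) :=
  (cur ++ t.takeWhile (fun z => z != 0)) :: segsRest (t.dropWhile (fun z => z != 0))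
termination_by (t.length, 1)
decreasing_by
  have := List.length_dropWhile_le (fun z => z != 0) t
  simp only [Prod.lex_def]; omega
def segsRest : List Int → List (List Int)
  | [] => []
  | y :: r => segsOf [y] r
termination_by v => (v.length, 0)
decreasing_by simp only [Prod.lex_def, List.length_cons]; omega
end

-- the common value of both programs on a = x :: t
def total : List Int → Int
  | [] => 0
  | x :: t =>
    (if x = 0 then maxcnt (psums 0 (x :: t.takeWhile (fun z => z != 0)))
     else (((psums 0 (x :: t.takeWhile (fun z => z != 0))).count 0 : Int))) +
    segRest (t.dropWhile (fun z => z != 0))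

-- A's main-loop step on a (prefix-sum, endmark) pair
def astep (st : PySem.Dict Int Int × Int × Int × Int) (pe : Int × Bool) :
    PySem.Dict Int Int × Int × Int × Int :=
  if pe.2 = false then
    let freq := st.1.modify pe.1 0 (· + 1)
    (freq, max st.2.1 (freq.getD pe.1 0), st.2.2.1, st.2.2.2)
  else
    let freq := st.1.modify pe.1 0 (· + 1)
    let max_freq := max st.2.1 (freq.getD pe.1 0)
    if st.2.2.2 = 0 then
      (PySem.Dict.empty, 0, st.2.2.1 + (if freq.contains 0 then freq.getD 0 0 else 0), 1)
    else
      (PySem.Dict.empty, 0, st.2.2.1 + max_freq, st.2.2.2)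

theorem astep_false_run (LF : List Int) (d : PySem.Dict Int Int) (m res flag : Int) :
    (LF.zip (List.replicate LF.length false)).foldl astep (d, m, res, flag)
      = ((LF.foldl cstep (d, m)).1, (LF.foldl cstep (d, m)).2, res, flag) := by
  induction LF generalizing d m with
  | nil => rfl
  | cons x t ih =>
    simp only [List.length_cons, List.replicate_succ, List.zip_cons_cons, List.foldl_cons]
    rw [show astep (d, m, res, flag) (x, false)
        = ((cstep (d, m) x).1, (cstep (d, m) x).2, res, flag) from rfl]
    rw [show cstep (d, m) x = ((cstep (d, m) x).1, (cstep (d, m) x).2) from rfl] at *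
    exact ih _ _

theorem psums_cons_ne_nil (c x : Int) (t : List Int) : psums c (x :: t) ≠ [] := by
  simp [psums]

theorem blockFold (L : List Int) (hL : L ≠ []) (res flag : Int) :
    (L.zip (List.replicate (L.length - 1) false ++ [true])).foldl astep
        (PySem.Dict.empty, 0, res, flag)
      = (PySem.Dict.empty, 0,
          res + (if flag = 0 then ((L.count 0 : Int)) else maxcnt L),
          if flag = 0 then 1 else flag) := by
  obtain ⟨I, z, rfl⟩ : ∃ I z, L = I ++ [z] :=
    ⟨L.dropLast, L.getLast hL, (List.dropLast_append_getLast hL).symm⟩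
  have hlen : (I ++ [z]).length - 1 = I.length := by simp
  rw [hlen, List.zip_append (by simp), List.foldl_append, astep_false_run]
  have hstep : astep ((I.foldl cstep (PySem.Dict.empty, 0)).1,
        (I.foldl cstep (PySem.Dict.empty, 0)).2, res, flag) (z, true)
      = (if flag = 0
          then (PySem.Dict.empty, 0,
            res + (if ((I ++ [z]).foldl cstep (PySem.Dict.empty, 0)).1.contains 0
                   then ((I ++ [z]).foldl cstep (PySem.Dict.empty, 0)).1.getD 0 0 else 0), 1)
          else (PySem.Dict.empty, 0,
            res + ((I ++ [z]).foldl cstep (PySem.Dict.empty, 0)).2, flag)) := by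
    rw [List.foldl_append, List.foldl_cons, List.foldl_nil]
    rw [show I.foldl cstep (PySem.Dict.empty, 0)
        = ((I.foldl cstep (PySem.Dict.empty, 0)).1, (I.foldl cstep (PySem.Dict.empty, 0)).2)
        from rfl]
    rfl
  rw [show ([z].zip [true] : List (Int × Bool)) = [(z, true)] from rfl,
    List.foldl_cons, List.foldl_nil, hstep]
  have hd : ((I ++ [z]).foldl cstep (PySem.Dict.empty, 0)).1
      = PySem.Dict.counter (I ++ [z]) := by
    rw [cstep_fst, PySem.Dict.counter_eq_foldl]
  have hm : ((I ++ [z]).foldl cstep (PySem.Dict.empty, 0)).2 = maxcnt (I ++ [z]) :=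
    cstep_snd_maxcnt (I ++ [z])
  by_cases hf : flag = 0
  · rw [if_pos hf, if_pos hf, if_pos hf, hd]
    by_cases h0 : (0 : Int) ∈ I ++ [z]
    · rw [if_pos (by rw [PySem.Dict.contains_counter]; exact List.elem_eq_true_of_mem h0),
        PySem.Dict.getD_counter]
    · rw [if_neg (by
        rw [PySem.Dict.contains_counter]
        simp only [List.contains_eq_mem]
        simpa using h0)]
      rw [List.count_eq_zero.mpr h0]
      norm_num
  · rw [if_neg hf, if_neg hf, if_neg hf, hm]

theorem bm_takeWhile (t : List Int) :
    bm (t.takeWhile (fun z => z != 0)) = List.replicate ((t.takeWhile (fun z => z != 0)).length) false := by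
  have := List.eq_replicate_of_mem (l := bm (t.takeWhile (fun z => z != 0))) (a := false) (by
    intro b hb
    obtain ⟨z, hz, rfl⟩ := List.mem_map.mp hb
    have := List.mem_takeWhile_imp hz
    simpa using fun h => by simp [h] at this)
  rw [this, bm, List.length_map]

theorem pairs_decomp_nil (c x : Int) (t : List Int)
    (hv : t.dropWhile (fun z => z != 0) = []) :
    (psums c (x :: t)).zip (bm t ++ [true])
      = (psums c (x :: t.takeWhile (fun z => z != 0))).zip
          (List.replicate ((psums c (x :: t.takeWhile (fun z => z != 0))).length - 1) false ++ [true]) := by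
  have ht : t.takeWhile (fun z => z != 0) = t := by
    have := List.takeWhile_append_dropWhile (p := fun z => z != 0) (l := t)
    rw [hv] at this
    simpa using this
  rw [ht, psums_len]
  simp only [List.length_cons, Nat.add_sub_cancel]
  rw [← ht, bm_takeWhile, ht]

theorem pairs_decomp_cons (c x : Int) (t : List Int) (y : Int) (r : List Int)
    (hv : t.dropWhile (fun z => z != 0) = y :: r) :
    (psums c (x :: t)).zip (bm t ++ [true])
      = (psums c (x :: t.takeWhile (fun z => z != 0))).zip
          (List.replicate ((psums c (x :: t.takeWhile (fun z => z != 0))).length - 1) false ++ [true])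
        ++ (psums (c + x + (t.takeWhile (fun z => z != 0)).sum) (y :: r)).zip (bm r ++ [true]) := by
  have hy : y = 0 := by
    have := List.head?_dropWhile_not (p := fun z => z != 0) (l := t)
    rw [hv] at this
    simpa using this
  have ht : (x :: t) = (x :: t.takeWhile (fun z => z != 0)) ++ (y :: r) := by
    have := List.takeWhile_append_dropWhile (p := fun z => z != 0) (l := t)
    rw [hv] at this
    rw [List.cons_append, this]
  rw [ht, psums_append]
  have hbm : bm t ++ [true]
      = (bm (t.takeWhile (fun z => z != 0)) ++ [true]) ++ (bm r ++ [true]) := by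
    conv_lhs => rw [← List.takeWhile_append_dropWhile (p := fun z => z != 0) (l := t)]
    rw [hv, bm, List.map_append, List.map_cons, ← bm, ← bm]
    rw [show decide (y = 0) = true by simp [hy]]
    simp
  rw [hbm, bm_takeWhile]
  rw [List.zip_append (by rw [psums_len]; simp)]
  rw [psums_len]
  simp only [List.length_cons, Nat.add_sub_cancel, List.sum_cons]
  rw [show c + (x + (t.takeWhile (fun z => z != 0)).sum)
      = c + x + (t.takeWhile (fun z => z != 0)).sum by ring]

theorem A_rest (N : Nat) : ∀ (y : Int) (r : List Int), r.length ≤ N → ∀ (c res : Int),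
    ((psums c (y :: r)).zip (bm r ++ [true])).foldl astep (PySem.Dict.empty, 0, res, 1)
      = (PySem.Dict.empty, 0, res + segSpec y r, 1) := by
  induction N with
  | zero =>
    intro y r hr c res
    have : r = [] := List.length_eq_zero_iff.mp (by omega)
    subst this
    rw [pairs_decomp_nil c y [] (by simp)]
    rw [blockFold _ (psums_cons_ne_nil _ _ _) res 1]
    rw [segSpec]
    simp [maxcnt_psums_shift, segRest]
  | succ N ih =>
    intro y r hr c res
    cases hv : r.dropWhile (fun z => z != 0) with
    | nil =>
      rw [pairs_decomp_nil c y r hv]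
      rw [blockFold _ (psums_cons_ne_nil _ _ _) res 1]
      rw [segSpec, hv]
      simp [maxcnt_psums_shift, segRest]
    | cons w r' =>
      rw [pairs_decomp_cons c y r w r' hv, List.foldl_append]
      rw [blockFold _ (psums_cons_ne_nil _ _ _) res 1]
      simp only [if_neg (by norm_num : ¬ (1 : Int) = 0)]
      have hlen : r'.length ≤ N := by
        have h1 := List.length_dropWhile_le (fun z => z != 0) r
        rw [hv] at h1
        simp at h1
        omega
      rw [ih w r' hlen _ _]
      conv_rhs => rw [segSpec, hv]
      simp only [segRest]
      rw [maxcnt_psums_shift]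
      ring_nf

theorem set_append_len {α : Type} (u w : List α) (v : α) :
    (u ++ w).set u.length v = u ++ w.set 0 v := by
  induction u with
  | nil => rfl
  | cons a u ih => simp [ih]

-- the value the endmark loop writes at index i
def emf (arr : List Int) (N : Nat) (i : Nat) : Bool :=
  if i + 1 < N then decide (arr.getD (i + 1) 0 = 0) else true

theorem em_build_inv (arr : List Int) (n : Int) (h1 : 1 ≤ n) :
    ∀ (m : Nat), m ≤ n.toNat →
    (PySem.List.pyRange 0 (m : Int) 1).foldl (fun em i =>
        if i + 1 < n then
          (if PySem.List.pyGetD arr (i + 1) 0 = 0 then PySem.List.pySetD em i true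
           else PySem.List.pySetD em i false)
        else PySem.List.pySetD em i true) (List.replicate n.toNat true)
      = (List.range m).map (emf arr n.toNat) ++ List.replicate (n.toNat - m) true := by
  intro m
  induction m with
  | zero => intro _; simp [PySem.List.pyRange_one_eq_nil]
  | succ m ih =>
    intro hm
    rw [show ((m + 1 : Nat) : Int) = (m : Int) + 1 by push_cast; ring]
    rw [PySem.List.pyRange_one_succ_right (by positivity), List.foldl_append,
      ih (by omega), List.foldl_cons, List.foldl_nil]
    have key : ∀ v : Bool,
        ((List.range m).map (emf arr n.toNat) ++ List.replicate (n.toNat - m) true).set m v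
          = (List.range m).map (emf arr n.toNat) ++ (v :: List.replicate (n.toNat - (m + 1)) true) := by
      intro v
      have hsa := set_append_len ((List.range m).map (emf arr n.toNat))
        (List.replicate (n.toNat - m) true) v
      simp only [List.length_map, List.length_range] at hsa
      rw [hsa, show n.toNat - m = (n.toNat - (m + 1)) + 1 by omega,
        List.replicate_succ, List.set_cons_zero]
    have hrange : (List.range (m + 1)).map (emf arr n.toNat)
        = (List.range m).map (emf arr n.toNat) ++ [emf arr n.toNat m] := by
      rw [List.range_succ, List.map_append, List.map_singleton]
    by_cases hc : (m : Int) + 1 < n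
    · rw [if_pos hc]
      have hcast : ((m : Int) + 1) = ((m + 1 : Nat) : Int) := by push_cast; ring
      have hga : PySem.List.pyGetD arr ((m : Int) + 1) 0 = arr.getD (m + 1) 0 := by
        rw [hcast, PySem.List.pyGetD_natCast]
      have hemf : emf arr n.toNat m = decide (arr.getD (m + 1) 0 = 0) := by
        rw [emf, if_pos (by omega)]
      by_cases hz : PySem.List.pyGetD arr ((m : Int) + 1) 0 = 0
      · rw [if_pos hz, PySem.List.pySetD_natCast, key, hrange]
        rw [show emf arr n.toNat m = true by rw [hemf, ← hga]; simp [hz]]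
        simp
      · rw [if_neg hz, PySem.List.pySetD_natCast, key, hrange]
        rw [show emf arr n.toNat m = false by rw [hemf, ← hga]; simp [hz]]
        simp
    · rw [if_neg hc, PySem.List.pySetD_natCast, key, hrange]
      rw [show emf arr n.toNat m = true by rw [emf, if_neg (by omega)]]
      simp

theorem em_build (arr : List Int) (n : Int) (h1 : 1 ≤ n) (h2 : n ≤ (arr.length : Int)) :
    (PySem.List.pyRange 0 n 1).foldl (fun em i =>
        if i + 1 < n then
          (if PySem.List.pyGetD arr (i + 1) 0 = 0 then PySem.List.pySetD em i true
           else PySem.List.pySetD em i false)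
        else PySem.List.pySetD em i true) (List.replicate n.toNat true)
      = bm ((arr.take n.toNat).tail) ++ [true] := by
  have hN : (1 : Nat) ≤ n.toNat ∧ n.toNat ≤ arr.length := by omega
  have htl : (arr.take n.toNat).length = n.toNat := by
    rw [List.length_take]; omega
  have hrg : PySem.List.pyRange 0 n 1 = PySem.List.pyRange 0 ((n.toNat : Nat) : Int) 1 := by
    rw [Int.toNat_of_nonneg (by omega)]
  rw [hrg, em_build_inv arr n h1 n.toNat (le_refl _)]
  rw [Nat.sub_self, List.replicate_zero, List.append_nil]
  apply List.ext_getElem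
  · simp [bm]; omega
  · intro i hi1 hi2
    simp only [List.getElem_map, List.getElem_range]
    by_cases hlast : i + 1 < n.toNat
    · rw [emf, if_pos hlast]
      have hbml : i < (bm ((arr.take n.toNat).tail)).length := by
        simp [bm]; omega
      rw [List.getElem_append_left hbml]
      simp only [bm, List.getElem_map]
      rw [List.getElem_tail, List.getElem_take]
      rw [List.getD_eq_getElem _ _ (by omega)]
    · rw [emf, if_neg hlast]
      have hbml : (bm ((arr.take n.toNat).tail)).length = n.toNat - 1 := by
        simp [bm]; omega
      rw [List.getElem_append_right (by omega)]
      simp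

theorem ps_build_inv (arr : List Int) (n : Int) (h1 : 1 ≤ n) (h2 : n ≤ (arr.length : Int)) :
    ∀ (m : Nat), 1 ≤ m → m ≤ n.toNat →
    (PySem.List.pyRange 1 (m : Int) 1).foldl (fun ps i =>
        PySem.List.pySetD ps i (PySem.List.pyGetD ps (i - 1) 0 + PySem.List.pyGetD arr i 0))
      (PySem.List.pySetD (List.replicate n.toNat 0) 0 (PySem.List.pyGetD arr 0 0))
      = psums 0 (arr.take m) ++ List.replicate (n.toNat - m) 0 := by
  intro m
  induction m with
  | zero => omega
  | succ m ih =>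
    intro _ hm
    by_cases hm1 : m = 0
    · subst hm1
      rw [show ((1 : Nat) : Int) = 1 by norm_num, PySem.List.pyRange_one_eq_nil (by norm_num),
        List.foldl_nil]
      have harr0 : arr ≠ [] := by
        intro h0; rw [h0] at h2; simp at h2; omega
      have h0l : 0 < arr.length := List.length_pos_iff.mpr harr0
      rw [show PySem.List.pyGetD arr 0 0 = arr[0] by
        rw [PySem.List.pyGetD_zero, List.getD_eq_getElem _ _ h0l]]
      rw [show PySem.List.pySetD (List.replicate n.toNat (0 : Int)) 0 arr[0]
          = (List.replicate n.toNat (0 : Int)).set 0 arr[0] from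
        PySem.List.pySetD_of_nonneg _ _ (by norm_num)]
      rw [show n.toNat = (n.toNat - 1) + 1 by omega, List.replicate_succ, List.set_cons_zero]
      rw [List.take_one, show arr.head? = some arr[0] from List.head?_eq_getElem?.trans (by
        rw [List.getElem?_eq_getElem h0l])]
      simp [psums]
    · have hmm : (1:Nat) ≤ m := by omega
      rw [show ((m + 1 : Nat) : Int) = (m : Int) + 1 by push_cast; ring]
      rw [PySem.List.pyRange_one_succ_right (by exact_mod_cast hmm), List.foldl_append,
        ih hmm (by omega), List.foldl_cons, List.foldl_nil]
      have hmlen : m < arr.length := by omega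
      have htk : (arr.take m).length = m := by rw [List.length_take]; omega
      have hpl : (psums 0 (arr.take m)).length = m := by rw [psums_len, htk]
      -- the read of ps[i-1]
      have hread : PySem.List.pyGetD (psums 0 (arr.take m) ++ List.replicate (n.toNat - m) 0)
          ((m : Int) - 1) 0 = 0 + (arr.take m).sum := by
        rw [show ((m : Int) - 1) = ((m - 1 : Nat) : Int) by omega, PySem.List.pyGetD_natCast]
        rw [List.getD_eq_getElem _ _ (by simp [hpl, List.length_replicate]; omega)]
        rw [List.getElem_append_left (by omega : m - 1 < (psums 0 (arr.take m)).length)]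
        have := psums_getElem 0 (arr.take m) (m - 1) (by omega)
        rw [this, show (m - 1) + 1 = m by omega, List.take_take]
        simp
      have harrm : PySem.List.pyGetD arr (m : Int) 0 = arr[m] := by
        rw [PySem.List.pyGetD_natCast, List.getD_eq_getElem _ _ hmlen]
      rw [hread, harrm, PySem.List.pySetD_natCast]
      have hsa := set_append_len (psums 0 (arr.take m)) (List.replicate (n.toNat - m) 0)
        (0 + (arr.take m).sum + arr[m])
      rw [hpl] at hsa
      rw [hsa, show n.toNat - m = (n.toNat - (m + 1)) + 1 by omega,
        List.replicate_succ, List.set_cons_zero]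
      rw [List.take_succ_eq_append_getElem hmlen, psums_append]
      simp [psums]

theorem ps_build (arr : List Int) (n : Int) (h1 : 1 ≤ n) (h2 : n ≤ (arr.length : Int)) :
    (PySem.List.pyRange 1 n 1).foldl (fun ps i =>
        PySem.List.pySetD ps i (PySem.List.pyGetD ps (i - 1) 0 + PySem.List.pyGetD arr i 0))
      (PySem.List.pySetD (List.replicate n.toNat 0) 0 (PySem.List.pyGetD arr 0 0))
      = psums 0 (arr.take n.toNat) := by
  have hrg : PySem.List.pyRange 1 n 1 = PySem.List.pyRange 1 ((n.toNat : Nat) : Int) 1 := by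
    rw [Int.toNat_of_nonneg (by omega)]
  rw [hrg, ps_build_inv arr n h1 h2 n.toNat (by omega) (le_refl _), Nat.sub_self,
    List.replicate_zero, List.append_nil]

theorem main_conv (n : Int) (ps : List Int) (em : List Bool)
    (hps : ps.length = n.toNat) (hem : em.length = n.toNat) (h0 : 0 ≤ n)
    (init : PySem.Dict Int Int × Int × Int × Int) :
    (PySem.List.pyRange 0 n 1).foldl
      (fun (st : PySem.Dict Int Int × Int × Int × Int) i =>
        let p := PySem.List.pyGetD ps i 0
        if PySem.List.pyGetD em i true = false then
          let freq := st.1.modify p 0 (· + 1)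
          (freq, max st.2.1 (freq.getD p 0), st.2.2.1, st.2.2.2)
        else
          let freq := st.1.modify p 0 (· + 1)
          let max_freq := max st.2.1 (freq.getD p 0)
          if st.2.2.2 = 0 then
            (PySem.Dict.empty, 0,
              st.2.2.1 + (if freq.contains 0 then freq.getD 0 0 else 0), 1)
          else
            (PySem.Dict.empty, 0, st.2.2.1 + max_freq, st.2.2.2)) init
      = (ps.zip em).foldl astep init := by
  have hzl : (ps.zip em).length = n.toNat := by
    rw [List.length_zip, hps, hem, min_self]
  have hcongr := PySem.List.foldl_congr_mem (PySem.List.pyRange 0 n 1)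
    (fun (st : PySem.Dict Int Int × Int × Int × Int) i =>
        let p := PySem.List.pyGetD ps i 0
        if PySem.List.pyGetD em i true = false then
          let freq := st.1.modify p 0 (· + 1)
          (freq, max st.2.1 (freq.getD p 0), st.2.2.1, st.2.2.2)
        else
          let freq := st.1.modify p 0 (· + 1)
          let max_freq := max st.2.1 (freq.getD p 0)
          if st.2.2.2 = 0 then
            (PySem.Dict.empty, 0,
              st.2.2.1 + (if freq.contains 0 then freq.getD 0 0 else 0), 1)
          else
            (PySem.Dict.empty, 0, st.2.2.1 + max_freq, st.2.2.2))
    (fun st i => astep st (PySem.List.pyGetD (ps.zip em) i (0, true))) init (by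
      intro st i hi
      dsimp only
      obtain ⟨hi0, hin⟩ := (PySem.List.mem_pyRange_one).mp hi
      have hilt : i < ((ps.zip em).length : Int) := by rw [hzl]; omega
      have h1 : PySem.List.pyGetD (ps.zip em) i (0, true) = (ps.zip em)[i.toNat] :=
        PySem.List.pyGetD_eq_getElem _ _ hi0 (by simpa using hilt)
      have hiN : i.toNat < n.toNat := by omega
      have h2 : (ps.zip em)[i.toNat]'(by omega) = (ps[i.toNat]'(by omega), em[i.toNat]'(by omega)) :=
        List.getElem_zip ..
      have h3 : PySem.List.pyGetD ps i 0 = ps[i.toNat]'(by omega) :=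
        PySem.List.pyGetD_eq_getElem _ _ hi0 (by rw [hps]; omega)
      have h4 : PySem.List.pyGetD em i true = em[i.toNat]'(by omega) :=
        PySem.List.pyGetD_eq_getElem _ _ hi0 (by rw [hem]; omega)
      rw [h1, h2, h3, h4]
      rfl)
  rw [hcongr]
  have hb : n = ((ps.zip em).length : Int) := by rw [hzl]; omega
  rw [hb]
  exact PySem.List.foldl_pyRange_zero_pyGetD' (ps.zip em) (0, true) astep init

theorem findmax_A_eq_total (arr : List Int) (n : Int)
    (h : Pre_findmax_zeroprefixes arr n) :
    findmax_zeroprefixes arr n = total (arr.take n.toNat) := by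
  obtain ⟨hn1, hn2⟩ := h
  have htk : (arr.take n.toNat).length = n.toNat := by rw [List.length_take]; omega
  have ha : arr.take n.toNat ≠ [] := by
    intro h0; rw [h0] at htk; simp at htk; omega
  obtain ⟨x, t, hxt⟩ := List.exists_cons_of_ne_nil ha
  have harr0 : 0 < arr.length := by omega
  have hx : PySem.List.pyGetD arr 0 0 = x := by
    obtain ⟨a0, arr', harr⟩ := List.exists_cons_of_ne_nil
      (by intro h0; rw [h0] at harr0; simp at harr0 : arr ≠ [])
    have htake : List.take n.toNat arr = a0 :: List.take (n.toNat - 1) arr' := by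
      conv_lhs => rw [harr, show n.toNat = (n.toNat - 1) + 1 by omega]
      rw [List.take_succ_cons]
    rw [htake] at hxt
    injection hxt with hxa _
    rw [harr, PySem.List.pyGetD_zero_cons, hxa]
  simp only [findmax_zeroprefixes]
  rw [em_build arr n hn1 hn2, ps_build arr n hn1 hn2]
  rw [main_conv n (psums 0 (arr.take n.toNat)) (bm ((arr.take n.toNat).tail) ++ [true])
    (by rw [psums_len, htk]) (by simp [bm]; omega) (by omega)]
  rw [hxt, List.tail_cons, hx]
  by_cases hx0 : x = 0
  · rw [if_pos hx0, A_rest t.length x t (le_refl _) 0 0]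
    rw [total, if_pos hx0, segSpec]
    simp
  · rw [if_neg hx0]
    cases hv : t.dropWhile (fun z => z != 0) with
    | nil =>
      rw [pairs_decomp_nil 0 x t hv, blockFold _ (psums_cons_ne_nil _ _ _) 0 0]
      rw [if_pos rfl, if_pos rfl]
      rw [total, if_neg hx0, hv]
      simp [segRest]
    | cons w r' =>
      rw [pairs_decomp_cons 0 x t w r' hv, List.foldl_append,
        blockFold _ (psums_cons_ne_nil _ _ _) 0 0]
      rw [if_pos rfl, if_pos rfl, A_rest r'.length w r' (le_refl _) _ _]
      rw [total, if_neg hx0, hv]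
      simp only [segRest]
      simp

-- ===== B side =====

theorem segsFold (t : List Int) (acc : List (List Int)) (cur : List Int) :
    (t.foldl (fun (sc : List (List Int) × List Int) x =>
        if x = 0 then (sc.1 ++ [sc.2], [x]) else (sc.1, sc.2 ++ [x])) (acc, cur)).1
      ++ [(t.foldl (fun (sc : List (List Int) × List Int) x =>
        if x = 0 then (sc.1 ++ [sc.2], [x]) else (sc.1, sc.2 ++ [x])) (acc, cur)).2]
      = acc ++ segsOf cur t := by
  induction t generalizing acc cur with
  | nil => simp [segsOf, segsRest]
  | cons z t ih =>
    by_cases hz : z = 0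
    · subst hz
      simp only [List.foldl_cons]
      rw [if_pos trivial, ih (acc ++ [cur]) [0]]
      rw [segsOf]
      simp [segsRest, segsOf]
    · simp only [List.foldl_cons, if_neg hz]
      rw [ih acc (cur ++ [z])]
      rw [segsOf, segsOf]
      have hb : (z != 0) = true := by simpa using hz
      simp [hb]

theorem innerCnt (seg : List Int) (d : PySem.Dict Int Int) (c : Int) :
    seg.foldl (fun (cs : PySem.Dict Int Int × Int) x =>
        (cs.1.modify (cs.2 + x) 0 (· + 1), cs.2 + x)) (d, c)
      = ((psums c seg).foldl (fun d s => d.modify s 0 (· + 1)) d, c + seg.sum) := by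
  induction seg generalizing d c with
  | nil => simp [psums]
  | cons x t ih =>
    simp only [List.foldl_cons, psums]
    rw [ih (d.modify (c + x) 0 (· + 1)) (c + x), List.sum_cons, add_assoc]

theorem max_values_psums (seg : List Int) (hseg : seg ≠ []) :
    (PySem.List.max? (PySem.Dict.counter (psums 0 seg)).values (fun v => v)).getD 0
      = maxcnt (psums 0 seg) := by
  obtain ⟨x, t, rfl⟩ := List.exists_cons_of_ne_nil hseg
  exact max_values_counter _ (psums_cons_ne_nil 0 x t)

theorem segsRest_ne_nil (N : Nat) : ∀ (v : List Int), v.length ≤ N →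
    ∀ seg ∈ segsRest v, seg ≠ [] := by
  induction N with
  | zero =>
    intro v hv seg hseg
    have : v = [] := List.length_eq_zero_iff.mp (by omega)
    subst this
    simp [segsRest] at hseg
  | succ N ih =>
    intro v hv seg hseg
    cases v with
    | nil => simp [segsRest] at hseg
    | cons y r =>
      simp only [segsRest, segsOf] at hseg
      rcases List.mem_cons.mp hseg with rfl | hseg
      · simp
      · have hd := List.length_dropWhile_le (fun z => z != 0) r
        exact ih _ (by simp at hv; omega) seg hseg

theorem segRest_sum (N : Nat) : ∀ (v : List Int), v.length ≤ N →
    segRest v = ((segsRest v).map (fun s => maxcnt (psums 0 s))).sum := by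
  induction N with
  | zero =>
    intro v hv
    have : v = [] := List.length_eq_zero_iff.mp (by omega)
    subst this
    simp [segRest, segsRest]
  | succ N ih =>
    intro v hv
    cases v with
    | nil => simp [segRest, segsRest]
    | cons y r =>
      simp only [segRest, segsRest, segSpec, segsOf]
      have hd := List.length_dropWhile_le (fun z => z != 0) r
      rw [ih _ (by simp at hv; omega)]
      simp

-- B's per-index loop body
def bbody (first : Int) (res : Int) (ks : Int × List Int) : Int :=
  let cs := ks.2.foldl (fun (cs : PySem.Dict Int Int × Int) x =>
      (cs.1.modify (cs.2 + x) 0 (· + 1), cs.2 + x)) (PySem.Dict.empty, 0)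
  if ks.1 = 0 ∧ first ≠ 0 then res + cs.1.getD 0 0
  else res + (PySem.List.max? cs.1.values (fun v => v)).getD 0

theorem bbody_pos (first res s : Int) (sg : List Int) (hs : ¬ (s = 0 ∧ first ≠ 0))
    (hsg : sg ≠ []) :
    bbody first res (s, sg) = res + maxcnt (psums 0 sg) := by
  simp only [bbody, hs, if_false, innerCnt, ← PySem.Dict.counter_eq_foldl,
    max_values_psums sg hsg]

theorem B_enum (first : Int) : ∀ (segs : List (List Int)), (∀ seg ∈ segs, seg ≠ []) →
    ∀ (s res : Int), 1 ≤ s →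
    (PySem.List.enumerate segs s).foldl (bbody first) res
      = res + (segs.map (fun seg => maxcnt (psums 0 seg))).sum := by
  intro segs
  induction segs with
  | nil => intro _ s res _; simp [PySem.List.enumerate_nil]
  | cons sg rest ih =>
    intro hne s res hs
    rw [PySem.List.enumerate_cons, List.foldl_cons,
      bbody_pos first res s sg (by rintro ⟨rfl, -⟩; omega) (hne sg (by simp)),
      ih (fun seg h => hne seg (by simp [h])) (s + 1) _ (by omega)]
    simp [add_assoc]

theorem findmax_B_eq_total (arr : List Int) (n : Int)
    (h : Pre_findmax_zeroprefixes arr n) :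
    findmax_zeroprefixes_alt arr n = total (arr.take n.toNat) := by
  obtain ⟨hn1, hn2⟩ := h
  have ha : (arr.take n.toNat) ≠ [] := by
    have hlt : (arr.take n.toNat).length = min n.toNat arr.length := List.length_take ..
    intro h0
    rw [h0] at hlt
    simp at hlt
    omega
  obtain ⟨x, t, hxt⟩ := List.exists_cons_of_ne_nil ha
  show (PySem.List.enumerate _ 0).foldl
      (bbody (PySem.List.pyGetD (PySem.List.slice arr none (some n)) 0 0)) 0 = _
  rw [PySem.List.slice_to _ (by omega), hxt]
  rw [PySem.List.pyGetD_zero_cons]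
  rw [PySem.List.slice_from_one, List.tail_cons]
  rw [segsFold t [] [x], List.nil_append, segsOf]
  rw [PySem.List.enumerate_cons, List.foldl_cons]
  have hfirst : bbody x 0 (0, [x] ++ t.takeWhile (fun z => z != 0))
      = (if x = 0 then maxcnt (psums 0 (x :: t.takeWhile (fun z => z != 0)))
         else (((psums 0 (x :: t.takeWhile (fun z => z != 0))).count 0 : Int))) := by
    by_cases hx : x = 0
    · rw [if_pos hx]
      have hns : ¬ ((0:Int) = 0 ∧ x ≠ 0) := by rintro ⟨-, hc⟩; exact hc hx
      rw [bbody_pos x 0 0 _ hns (by simp)]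
      simp
    · simp only [bbody, List.singleton_append, innerCnt, ← PySem.Dict.counter_eq_foldl]
      rw [if_pos (⟨trivial, hx⟩ : _ ∧ x ≠ 0), if_neg hx, PySem.Dict.getD_counter]
      simp
  rw [hfirst, B_enum x _ (segsRest_ne_nil _ _ (le_refl _)) (0 + 1) _ (by omega),
    ← segRest_sum _ _ (le_refl _), total]

-- ===== VERDICT (by name: the statement is the Claim_ definition above) =====
theorem findmax_zeroprefixes_spec : Claim_equal_findmax_zeroprefixes := by
  intro arr n _ hpre
  unfold Spec_findmax_zeroprefixes
  rw [findmax_A_eq_total arr n hpre, findmax_B_eq_total arr n hpre]
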